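-- pv_equiv track=rewrite | github.com/janwychowaniak/flowbridge | flowbridge/core/forwarder.py | _prepare_forwarding_headers
-- ===== SOURCE A (Python) =====
-- from typing import Dict, Any, Optional, Tuple
--
-- def _prepare_forwarding_headers(original_headers: Optional[Dict[str, str]]) -> Dict[str, str]:
--     """
--     Prepare headers for forwarding request to destination.
--
--     Args:
--         original_headers: Original request headers
--
--     Returns:
--         Headers suitable for forwarding
--     """
--     forwarding_headers = {
--         'Content-Type': 'application/json',
--         'User-Agent': 'FlowBridge/1.0'
--     }
--
--     if original_headers:
--         # Preserve correlation headers
--         correlation_headers = [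
--             'x-request-id',
--             'x-correlation-id',
--             'x-trace-id'
--         ]
--
--         for header_name in correlation_headers:
--             if header_name in original_headers:
--                 forwarding_headers[header_name] = original_headers[header_name]
--             # Also check lowercase and case-insensitive versions
--             for orig_key, orig_value in original_headers.items():
--                 if orig_key.lower() == header_name.lower():
--                     forwarding_headers[header_name] = orig_value
--                     break
--
--     return forwarding_headers
-- ===== SOURCE B (Python) =====
-- from typing import Dict, Optional
--
-- def _prepare_forwarding_headers(original_headers: Optional[Dict[str, str]]) -> Dict[str, str]:
--     """Prepare headers for forwarding request to destination."""
--     forwarding_headers = {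
--         'Content-Type': 'application/json',
--         'User-Agent': 'FlowBridge/1.0'
--     }
--     if original_headers:
--         index = {}
--         for key, value in original_headers.items():
--             lk = key.lower()
--             if lk not in index:
--                 index[lk] = value
--         for name in ('x-request-id', 'x-correlation-id', 'x-trace-id'):
--             if name in index:
--                 forwarding_headers[name] = index[name]
--     return forwarding_headers
-- ===== Notes on version B (the rewrite author's own statement) =====
-- stated objective: simpler
-- what changed: Replaces the per-header nested scan over all items (and its dead exact-membership check) with one lowercase-keyed first-occurrence index built in a single pass, then three direct lookups.
import Mathlib
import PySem

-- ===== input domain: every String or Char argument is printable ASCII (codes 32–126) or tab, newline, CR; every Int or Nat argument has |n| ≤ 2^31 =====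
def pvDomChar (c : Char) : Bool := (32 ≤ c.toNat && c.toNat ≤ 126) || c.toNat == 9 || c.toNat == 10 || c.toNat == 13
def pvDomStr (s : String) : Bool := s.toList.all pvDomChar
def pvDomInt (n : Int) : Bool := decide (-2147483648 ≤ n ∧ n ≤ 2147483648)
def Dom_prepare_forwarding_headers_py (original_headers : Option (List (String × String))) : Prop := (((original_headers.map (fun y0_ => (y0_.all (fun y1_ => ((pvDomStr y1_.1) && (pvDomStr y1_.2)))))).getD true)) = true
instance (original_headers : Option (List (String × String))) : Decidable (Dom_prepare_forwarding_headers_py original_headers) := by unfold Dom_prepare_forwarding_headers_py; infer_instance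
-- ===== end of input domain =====

-- B replaces A's per-header nested scan (and its dead exact-membership check) with one
-- lowercase first-occurrence index built in a single pass, then three direct lookups (simpler).

-- ===== PORT A =====
def pvBase : PySem.Dict String String :=
  PySem.Dict.ofList [("Content-Type", "application/json"), ("User-Agent", "FlowBridge/1.0")]

def pvCorr : List String := ["x-request-id", "x-correlation-id", "x-trace-id"]

-- body of A's 'for header_name in correlation_headers' loop; the inner 'for … break' is the
-- first item whose lowercased key equals the lowercased name (List.find?)
def pvStepA (hs : List (String × String)) (fwd : PySem.Dict String String) (name : String) :
    PySem.Dict String String :=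
  let fwd1 :=
    match (PySem.Dict.mk hs).get? name with
    | some v => fwd.insert name v
    | none => fwd
  match hs.find? (fun p => PySem.Str.lower p.1 == PySem.Str.lower name) with
  | some p => fwd1.insert name p.2
  | none => fwd1

def prepare_forwarding_headers_py (original_headers : Option (List (String × String))) :
    List (String × String) :=
  match original_headers with
  | none => pvBase.items
  | some hs => if hs.isEmpty then pvBase.items else (pvCorr.foldl (pvStepA hs) pvBase).items

-- ===== PORT B =====
def pvBuildIdx (hs : List (String × String)) : PySem.Dict String String :=
  hs.foldl
    (fun idx p =>
      if idx.contains (PySem.Str.lower p.1) then idx else idx.insert (PySem.Str.lower p.1) p.2)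
    PySem.Dict.empty

def pvStepB (idx fwd : PySem.Dict String String) (name : String) : PySem.Dict String String :=
  match idx.get? name with
  | some v => fwd.insert name v
  | none => fwd

def prepare_forwarding_headers_py_alt (original_headers : Option (List (String × String))) :
    List (String × String) :=
  match original_headers with
  | none => pvBase.items
  | some hs =>
    if hs.isEmpty then pvBase.items
    else (["x-request-id", "x-correlation-id", "x-trace-id"].foldl
            (pvStepB (pvBuildIdx hs)) pvBase).items

-- ===== PRECONDITION & SPEC =====
def Spec_prepare_forwarding_headers_py (original_headers : Option (List (String × String))) (out : List (String × String)) : Prop := out = prepare_forwarding_headers_py_alt original_headers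
instance (original_headers : Option (List (String × String))) (out : List (String × String)) : Decidable (Spec_prepare_forwarding_headers_py original_headers out) := by unfold Spec_prepare_forwarding_headers_py; infer_instance

-- ===== CLAIM (what is proved, stated in full; the proofs are below) =====
def Claim_equal_prepare_forwarding_headers_py : Prop := ∀ (original_headers : Option (List (String × String))), Dom_prepare_forwarding_headers_py original_headers → Spec_prepare_forwarding_headers_py original_headers (prepare_forwarding_headers_py original_headers)

-- ===== LEMMAS AND PROOFS =====

-- what one lookup in B's index returns: the first item whose lowercased key matches
theorem pv_idx_get (hs : List (String × String)) (idx : PySem.Dict String String) (key : String) :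
    (hs.foldl
        (fun idx p =>
          if idx.contains (PySem.Str.lower p.1) then idx
          else idx.insert (PySem.Str.lower p.1) p.2) idx).get? key
      = (idx.get? key).or
          ((hs.find? (fun p => PySem.Str.lower p.1 == key)).map (·.2)) := by
  induction hs generalizing idx with
  | nil => simp
  | cons p t ih =>
    simp only [List.foldl_cons, List.find?_cons]
    by_cases hk : PySem.Str.lower p.1 = key
    · subst hk
      simp only [beq_self_eq_true, Option.map_some]
      by_cases hc : idx.contains (PySem.Str.lower p.1) = true
      · rw [if_pos hc, ih]
        rcases h : idx.get? (PySem.Str.lower p.1) with _ | v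
        · rw [PySem.Dict.get?_eq_none_iff_contains] at h; simp [h] at hc
        · simp
      · rw [if_neg hc, ih, PySem.Dict.get?_insert]
        have h : idx.get? (PySem.Str.lower p.1) = none := by
          rw [PySem.Dict.get?_eq_none_iff_contains]; simpa using hc
        simp [h]
    · have hb : (PySem.Str.lower p.1 == key) = false := by simpa using hk
      rw [hb]
      skip
      by_cases hc : idx.contains (PySem.Str.lower p.1) = true
      · rw [if_pos hc, ih]
      · rw [if_neg hc, ih, PySem.Dict.get?_insert, if_neg (Ne.symm hk)]

-- per-name step equality, for an already-lowercase name
theorem pv_step_eq (hs : List (String × String)) (name : String)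
    (hname : PySem.Str.lower name = name) (fwd : PySem.Dict String String) :
    pvStepA hs fwd name = pvStepB (pvBuildIdx hs) fwd name := by
  have hidx : (pvBuildIdx hs).get? name
      = (hs.find? (fun p => PySem.Str.lower p.1 == name)).map (·.2) := by
    rw [pvBuildIdx, pv_idx_get]; simp
  unfold pvStepA pvStepB
  rw [hidx, hname]
  rcases hf : hs.find? (fun p => PySem.Str.lower p.1 == name) with _ | p <;> rw [hf]
  · -- no case-insensitive match ⇒ no exact match either
    have hg : (PySem.Dict.mk hs).get? name = none := by
      rw [PySem.Dict.get?_eq_none_iff_not_mem_keys]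
      intro hmem
      rw [PySem.Dict.keys_mk, List.mem_map] at hmem
      obtain ⟨q, hq, hq1⟩ := hmem
      have := List.find?_eq_none.mp hf q hq
      rw [hq1, hname] at this; simp at this
    simp [hg]
  · rcases hg : (PySem.Dict.mk hs).get? name with _ | v
    · simp
    · simp [PySem.Dict.insert_insert_self]

-- ===== VERDICT (by name: the statement is the Claim_ definition above) =====
theorem prepare_forwarding_headers_py_spec : Claim_equal_prepare_forwarding_headers_py := by
  intro oh _
  unfold Spec_prepare_forwarding_headers_py prepare_forwarding_headers_py
    prepare_forwarding_headers_py_alt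
  rcases oh with _ | hs
  · rfl
  · rcases h : hs.isEmpty with _ | _
    · simp only [pvCorr, List.foldl_cons, List.foldl_nil]
      rw [pv_step_eq hs "x-request-id" (by decide),
          pv_step_eq hs "x-correlation-id" (by decide),
          pv_step_eq hs "x-trace-id" (by decide)]
    · simp [h]
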